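-- pv_equiv track=rewrite | github.com/lapastillaroja/replay-control | tools/analyze_regional_mods.py | extract_bracket_tags
-- ===== SOURCE A (Python) =====
-- def extract_bracket_tags(stem):
--     """Extract all [...] tags from a filename stem."""
--     tags = []
--     i = 0
--     while i < len(stem):
--         open_idx = stem.find('[', i)
--         if open_idx == -1:
--             break
--         close_idx = stem.find(']', open_idx + 1)
--         if close_idx == -1:
--             break
--         tags.append(stem[open_idx + 1:close_idx])
--         i = close_idx + 1
--     return tags
-- ===== SOURCE B (Python) =====
-- def extract_bracket_tags(stem):
--     """Extract all [...] tags from a filename stem."""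
--     tags = []
--     cur = None  # None = outside brackets; list of chars = inside, collecting
--     for ch in stem:
--         if cur is None:
--             if ch == '[':
--                 cur = []
--         elif ch == ']':
--             tags.append(''.join(cur))
--             cur = None
--         else:
--             cur.append(ch)
--     return tags
-- ===== Notes on version B (the rewrite author's own statement) =====
-- stated objective: alternative
-- what changed: Replaces the find-and-jump index loop (str.find for '[' then ']' with slicing) by a single per-character state-machine pass that collects tag characters into an accumulator.
import Mathlib
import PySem

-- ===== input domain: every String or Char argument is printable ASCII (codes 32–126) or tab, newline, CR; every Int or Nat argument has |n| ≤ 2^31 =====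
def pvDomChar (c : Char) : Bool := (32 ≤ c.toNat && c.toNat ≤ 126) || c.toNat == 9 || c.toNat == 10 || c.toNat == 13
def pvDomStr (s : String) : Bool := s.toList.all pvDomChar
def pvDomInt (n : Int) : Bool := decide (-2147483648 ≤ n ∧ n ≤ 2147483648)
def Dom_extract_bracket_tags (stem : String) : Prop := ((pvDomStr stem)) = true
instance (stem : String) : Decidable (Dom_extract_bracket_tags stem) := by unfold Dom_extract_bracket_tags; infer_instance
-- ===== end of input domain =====

-- B replaces A's find-and-jump index loop by a single per-character state-machine scan; alternative decomposition, same O(n) cost.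


-- ===== PORT A =====
-- A's while loop over index i: stem.find('[', i) = skip the remaining suffix to its first '[';
-- stem.find(']', open_idx+1) = skip to the first ']' after it; the slice between them is the tag;
-- i = close_idx + 1 = continue on the suffix after that ']'. Ported as recursion on the suffix.
def pvLoopA (cs : List Char) : List String :=
  match h : cs.dropWhile (· ≠ '[') with       -- open_idx = stem.find('[', i)
  | [] => []                                  -- open_idx == -1: break
  | _ :: after =>
    match h2 : after.dropWhile (· ≠ ']') with -- close_idx = stem.find(']', open_idx + 1)
    | [] => []                                -- close_idx == -1: break
    | _ :: tail =>
      -- tags.append(stem[open_idx+1:close_idx]); i = close_idx + 1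
      String.ofList (after.takeWhile (· ≠ ']')) :: pvLoopA tail
termination_by cs.length
decreasing_by
  have ha : (cs.dropWhile (· ≠ '[')).length ≤ cs.length :=
    (List.dropWhile_sublist _).length_le
  have hb : (after.dropWhile (· ≠ ']')).length ≤ after.length :=
    (List.dropWhile_sublist _).length_le
  simp_all; omega

def extract_bracket_tags (stem : String) : List String := pvLoopA stem.toList

-- ===== PORT B =====
-- one character at a time; state: none = outside brackets, some cur = inside, collecting chars
def pvStepB (st : Option (List Char) × List String) (c : Char) :
    Option (List Char) × List String :=
  match st with
  | (none, tags) => if c = '[' then (some [], tags) else (none, tags)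
  | (some cur, tags) =>
    if c = ']' then (none, tags ++ [String.ofList cur]) else (some (cur ++ [c]), tags)

def extract_bracket_tags_alt (stem : String) : List String :=
  (stem.toList.foldl pvStepB (none, [])).2

-- ===== PRECONDITION & SPEC =====
def Spec_extract_bracket_tags (stem : String) (out : List String) : Prop := out = extract_bracket_tags_alt stem
instance (stem : String) (out : List String) : Decidable (Spec_extract_bracket_tags stem out) := by unfold Spec_extract_bracket_tags; infer_instance

-- ===== CLAIM (what is proved, stated in full; the proofs are below) =====
def Claim_equal_extract_bracket_tags : Prop := ∀ (stem : String), Dom_extract_bracket_tags stem → Spec_extract_bracket_tags stem (extract_bracket_tags stem)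

-- ===== LEMMAS AND PROOFS =====

-- unfolding equations for pvLoopA (its dependent matches block simp, so we name the three shapes)
lemma pvLoopA_no_open {cs : List Char} (h : cs.dropWhile (· ≠ '[') = []) :
    pvLoopA cs = [] := by
  rw [pvLoopA]
  split
  · rfl
  · rename_i head after heq
    rw [h] at heq; exact absurd heq (by simp)

lemma pvLoopA_no_close {cs : List Char} {x : Char} {after : List Char}
    (h : cs.dropWhile (· ≠ '[') = x :: after)
    (h2 : after.dropWhile (· ≠ ']') = []) : pvLoopA cs = [] := by
  rw [pvLoopA]
  split
  · rfl
  · rename_i y after' heq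
    rw [h] at heq
    obtain ⟨rfl, rfl⟩ : y = x ∧ after' = after := by simp_all
    split
    · rfl
    · rename_i z tail' heq2
      rw [h2] at heq2; exact absurd heq2 (by simp)

lemma pvLoopA_close {cs : List Char} {x y : Char} {after tail : List Char}
    (h : cs.dropWhile (· ≠ '[') = x :: after)
    (h2 : after.dropWhile (· ≠ ']') = y :: tail) :
    pvLoopA cs = String.ofList (after.takeWhile (· ≠ ']')) :: pvLoopA tail := by
  rw [pvLoopA]
  split
  · rename_i heq
    rw [h] at heq; exact absurd heq (by simp)
  · rename_i y' after' heq
    rw [h] at heq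
    obtain ⟨rfl, rfl⟩ : y' = x ∧ after' = after := by simp_all
    split
    · rename_i heq2
      rw [h2] at heq2; exact absurd heq2 (by simp)
    · rename_i z tail' heq2
      rw [h2] at heq2
      obtain ⟨rfl, rfl⟩ : z = y ∧ tail' = tail := by simp_all
      rfl

-- recursive rendering of B's foldl state machine, used only in the proof
def pvRunB : Option (List Char) → List Char → List String
  | _, [] => []
  | none, c :: cs => if c = '[' then pvRunB (some []) cs else pvRunB none cs
  | some cur, c :: cs =>
    if c = ']' then String.ofList cur :: pvRunB none cs else pvRunB (some (cur ++ [c])) cs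

lemma pv_foldl_eq_runB (cs : List Char) : ∀ (st : Option (List Char) × List String),
    (cs.foldl pvStepB st).2 = st.2 ++ pvRunB st.1 cs := by
  induction cs with
  | nil => intro st; simp [pvRunB]
  | cons c cs ih =>
    rintro ⟨cur?, tags⟩
    cases cur? with
    | none =>
      by_cases h : c = '['
      · simp [pvStepB, h, ih, pvRunB]
      · simp [pvStepB, h, ih, pvRunB]
    | some cur =>
      by_cases h : c = ']'
      · simp [pvStepB, h, ih, pvRunB]
      · simp [pvStepB, h, ih, pvRunB]

-- while inside brackets, B collects exactly until the first ']' — A's find(']', …)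
lemma pv_runB_some (cs : List Char) : ∀ (cur : List Char),
    pvRunB (some cur) cs =
      match cs.dropWhile (· ≠ ']') with
      | [] => []
      | _ :: tail => String.ofList (cur ++ cs.takeWhile (· ≠ ']')) :: pvRunB none tail := by
  induction cs with
  | nil => intro cur; simp [pvRunB]
  | cons c cs ih =>
    intro cur
    by_cases h : c = ']'
    · simp [pvRunB, h]
    · rw [show pvRunB (some cur) (c :: cs) = pvRunB (some (cur ++ [c])) cs by
        simp [pvRunB, h]]
      rw [ih (cur ++ [c])]
      rw [show (c :: cs).dropWhile (· ≠ ']') = cs.dropWhile (· ≠ ']') by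
        simp [h]]
      rw [show (c :: cs).takeWhile (· ≠ ']') = c :: cs.takeWhile (· ≠ ']') by
        simp [h]]
      cases cs.dropWhile (· ≠ ']') <;> simp

lemma pv_runB_none_eq_loopA (cs : List Char) : pvRunB none cs = pvLoopA cs := by
  induction hn : cs.length using Nat.strong_induction_on generalizing cs with
  | _ n ih =>
    cases cs with
    | nil => rw [pvLoopA_no_open (cs := []) rfl]; rfl
    | cons c cs' =>
      by_cases h : c = '['
      · have hopen : (c :: cs').dropWhile (· ≠ '[') = c :: cs' :=
          List.dropWhile_cons_of_neg (by simp [h])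
        rw [show pvRunB none (c :: cs') = pvRunB (some []) cs' by simp [pvRunB, h]]
        rw [pv_runB_some]
        cases hd : cs'.dropWhile (· ≠ ']') with
        | nil => simp [pvLoopA_no_close hopen hd]
        | cons y tail =>
          have htail : tail.length < n := by
            have h1 := (List.dropWhile_sublist (l := cs') (p := (· ≠ ']'))).length_le
            rw [hd] at h1
            have h2 : cs'.length + 1 = n := by simpa using hn
            simp at h1
            omega
          rw [pvLoopA_close hopen hd]
          simp [ih tail.length htail tail rfl]
      · have hskip : (c :: cs').dropWhile (· ≠ '[') = cs'.dropWhile (· ≠ '[') :=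
          List.dropWhile_cons_of_pos (by simp [h])
        rw [show pvRunB none (c :: cs') = pvRunB none cs' by simp [pvRunB, h]]
        rw [ih cs'.length (by simp at hn; omega) cs' rfl]
        cases hd : cs'.dropWhile (· ≠ '[') with
        | nil => rw [pvLoopA_no_open hd, pvLoopA_no_open (hskip.trans hd)]
        | cons x after =>
          cases hd2 : after.dropWhile (· ≠ ']') with
          | nil => rw [pvLoopA_no_close hd hd2, pvLoopA_no_close (hskip.trans hd) hd2]
          | cons y tail =>
            rw [pvLoopA_close hd hd2, pvLoopA_close (hskip.trans hd) hd2]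

-- ===== VERDICT (by name: the statement is the Claim_ definition above) =====
theorem extract_bracket_tags_spec : Claim_equal_extract_bracket_tags := by
  intro stem _
  unfold Spec_extract_bracket_tags extract_bracket_tags extract_bracket_tags_alt
  rw [pv_foldl_eq_runB, pv_runB_none_eq_loopA]
  simp
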